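-- pv_equiv track=rewrite | github.com/msbrewer/AdventOfCode2019 | day3_code.py | moves
-- ===== SOURCE A (Python) =====
-- def moves(wireRoute, ):
--     x = 0
--     y = 0
--     moveList = []
--     for point in wireRoute:
--         if point[0] == "R":
--             x += int(point[1:])
--         if point[0] == "L":
--             x -= int(point[1:])
--         if point[0] == "U":
--             y += int(point[1:])
--         if point[0] == "D":
--             y -= int(point[1:])
--         moveList.append((x,y))
--     return moveList
-- ===== SOURCE B (Python) =====
-- # B: divide and conquer — solve each half of the route independently, then
-- # translate the right half's waypoints by the left half's final position.
-- def _delta(point):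
--     c = point[0]
--     if c == 'R':
--         return (int(point[1:]), 0)
--     if c == 'L':
--         return (-int(point[1:]), 0)
--     if c == 'U':
--         return (0, int(point[1:]))
--     if c == 'D':
--         return (0, -int(point[1:]))
--     return (0, 0)
--
-- def moves(wireRoute):
--     if not wireRoute:
--         return []
--     if len(wireRoute) == 1:
--         return [_delta(wireRoute[0])]
--     mid = len(wireRoute) // 2
--     left = moves(wireRoute[:mid])
--     right = moves(wireRoute[mid:])
--     ox, oy = left[-1]
--     return left + [(ox + x, oy + y) for (x, y) in right]
-- ===== Notes on version B (the rewrite author's own statement) =====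
-- stated objective: alternative
-- what changed: Replaces the single forward pass with mutating running coordinates by a divide-and-conquer recursion: solve the two halves of the route independently and translate the right half's waypoints by the left half's final position (correct because waypoints are prefix sums of the per-move displacement vectors, and prefix sums compose under concatenation by translation).
import Mathlib
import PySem

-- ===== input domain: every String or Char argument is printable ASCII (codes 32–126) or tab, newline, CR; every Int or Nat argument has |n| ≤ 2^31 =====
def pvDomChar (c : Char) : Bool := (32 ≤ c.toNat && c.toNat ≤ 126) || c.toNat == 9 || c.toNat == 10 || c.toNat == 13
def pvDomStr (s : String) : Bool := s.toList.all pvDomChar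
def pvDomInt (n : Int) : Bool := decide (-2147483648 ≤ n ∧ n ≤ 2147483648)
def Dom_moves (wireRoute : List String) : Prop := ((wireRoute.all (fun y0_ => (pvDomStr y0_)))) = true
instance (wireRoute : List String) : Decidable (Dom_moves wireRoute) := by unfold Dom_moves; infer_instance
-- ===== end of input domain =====

-- B replaces A's single forward pass (mutating running coordinates) by a divide-and-conquer
-- recursion on the route: solve both halves, translate the right half by the left half's final
-- position; objective: alternative algorithm (not faster).

-- ===== PORT A =====
-- one iteration of A's loop body: the four sequential ifs updating x and y
-- (point[0] ported as toList.headD ' ': Pre_ excludes the empty string where Python raises IndexError;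
--  int(point[1:]) ported as (PySem.Int.ofChars? point.toList.tail).getD 0: Pre_ excludes the none case = ValueError)
def movesStep (xy : Int × Int) (point : String) : Int × Int :=
  let c0 := point.toList.headD ' '
  let n := (PySem.Int.ofChars? point.toList.tail).getD 0
  let x := if c0 = 'R' then xy.1 + n else xy.1
  let x := if c0 = 'L' then x - n else x
  let y := if c0 = 'U' then xy.2 + n else xy.2
  let y := if c0 = 'D' then y - n else y
  (x, y)

def moves (wireRoute : List String) : List (Int × Int) :=
  (wireRoute.foldl
    (fun (st : (Int × Int) × List (Int × Int)) point =>
      let xy := movesStep st.1 point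
      (xy, st.2 ++ [xy]))
    ((0, 0), [])).2

-- ===== PORT B =====
-- Source B's _delta: elif chain producing one displacement vector
-- (point[0] / int(point[1:]) ported exactly as in port A; Pre_ excludes the raising inputs)
def delta (point : String) : Int × Int :=
  let c := point.toList.headD ' '
  if c = 'R' then ((PySem.Int.ofChars? point.toList.tail).getD 0, 0)
  else if c = 'L' then (-((PySem.Int.ofChars? point.toList.tail).getD 0), 0)
  else if c = 'U' then (0, (PySem.Int.ofChars? point.toList.tail).getD 0)
  else if c = 'D' then (0, -((PySem.Int.ofChars? point.toList.tail).getD 0))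
  else (0, 0)

-- Source B's moves: divide and conquer (left[-1] is never missing here — the left half is nonempty —
-- so the .getD (0,0) default is unreachable)
def moves_alt (wireRoute : List String) : List (Int × Int) :=
  match wireRoute with
  | [] => []
  | [p] => [delta p]
  | p :: q :: rest =>
      let mid := (p :: q :: rest).length / 2
      let left := moves_alt ((p :: q :: rest).take mid)
      let right := moves_alt ((p :: q :: rest).drop mid)
      let o := (PySem.List.pyGet? left (-1)).getD (0, 0)
      left ++ right.map (fun xy => (o.1 + xy.1, o.2 + xy.2))
termination_by wireRoute.length
decreasing_by all_goals simp; omega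

-- ===== PRECONDITION & SPEC =====
-- Pre_ excludes exactly the inputs on which Python A raises: an empty string (IndexError on point[0]),
-- and a move whose letter is R/L/U/D but whose remainder is not a valid int literal (ValueError).
def Pre_moves (wireRoute : List String) : Prop :=
  ∀ s ∈ wireRoute, s.toList ≠ [] ∧
    (s.toList.headD ' ' ∈ (['R', 'L', 'U', 'D'] : List Char) →
      (PySem.Int.ofChars? s.toList.tail).isSome = true)
instance (wireRoute : List String) : Decidable (Pre_moves wireRoute) := by
  unfold Pre_moves; infer_instance

def pvWitness_moves : List String := ["R8", "U5", "X2", "D3", "L12"]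

def Spec_moves (wireRoute : List String) (out : List (Int × Int)) : Prop := out = moves_alt wireRoute
instance (wireRoute : List String) (out : List (Int × Int)) : Decidable (Spec_moves wireRoute out) := by unfold Spec_moves; infer_instance

-- ===== CLAIM (what is proved, stated in full; the proofs are below) =====
def Claim_equal_moves : Prop := ∀ (wireRoute : List String), Dom_moves wireRoute → Pre_moves wireRoute → Spec_moves wireRoute (moves wireRoute)

-- ===== LEMMAS AND PROOFS =====

-- waypoints = prefix sums of the displacement vectors, starting at p (proof-only helper)
def psum : Int × Int → List (Int × Int) → List (Int × Int)
  | _, [] => []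
  | p, d :: ds =>
      let q := (p.1 + d.1, p.2 + d.2)
      q :: psum q ds

-- A's loop body adds exactly B's displacement vector
theorem movesStep_eq_delta (xy : Int × Int) (point : String) :
    movesStep xy point = (xy.1 + (delta point).1, xy.2 + (delta point).2) := by
  unfold movesStep delta
  by_cases hR : point.toList.headD ' ' = 'R' <;>
  by_cases hL : point.toList.headD ' ' = 'L' <;>
  by_cases hU : point.toList.headD ' ' = 'U' <;>
  by_cases hD : point.toList.headD ' ' = 'D' <;>
  simp_all [Prod.ext_iff] <;> ring

-- A's fold computes the prefix sums of the deltas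
theorem foldl_eq_psum (ws : List String) (xy : Int × Int) (acc : List (Int × Int)) :
    (ws.foldl
      (fun (st : (Int × Int) × List (Int × Int)) point =>
        let p := movesStep st.1 point
        (p, st.2 ++ [p]))
      (xy, acc)).2 = acc ++ psum xy (ws.map delta) := by
  induction ws generalizing xy acc with
  | nil => simp [psum]
  | cons w ws ih =>
      rw [List.foldl_cons, ih]
      simp [psum, movesStep_eq_delta]

theorem getD_getLast?_cons {α : Type} : ∀ (l : List α) (x o : α),
    ((x :: l).getLast?).getD o = (l.getLast?).getD x
  | [], _, _ => by simp
  | y :: l, x, o => by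
      rw [show (x :: y :: l).getLast? = (y :: l).getLast? from List.getLast?_cons_cons ..]
      rw [getD_getLast?_cons l y o, getD_getLast?_cons l y x]

theorem psum_append (a b : List (Int × Int)) (o : Int × Int) :
    psum o (a ++ b) = psum o a ++ psum ((psum o a).getLast?.getD o) b := by
  induction a generalizing o with
  | nil => simp [psum]
  | cons d a ih => simp [psum, ih, getD_getLast?_cons]

theorem psum_translate (b : List (Int × Int)) (o : Int × Int) :
    psum o b = (psum (0, 0) b).map (fun q => (o.1 + q.1, o.2 + q.2)) := by
  induction b generalizing o with
  | nil => simp [psum]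
  | cons d b ih =>
      simp only [psum, List.map_cons]
      rw [ih (o.1 + d.1, o.2 + d.2), ih (0 + d.1, 0 + d.2), List.map_map]
      refine congrArg₂ List.cons (by simp) ?_
      refine List.map_congr_left (fun q _ => ?_)
      simp [Function.comp]
      constructor <;> ring

-- B's divide and conquer computes the same prefix sums
theorem moves_alt_eq_psum (ws : List String) :
    moves_alt ws = psum (0, 0) (ws.map delta) := by
  match ws with
  | [] => simp [moves_alt, psum]
  | [p] => simp [moves_alt, psum]
  | p :: q :: rest =>
      have hlen : 2 ≤ (p :: q :: rest).length := by simp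
      set n := (p :: q :: rest).length with hn
      have hmid1 : 1 ≤ n / 2 := by omega
      have hmid2 : n / 2 < n := by omega
      have hIHl := moves_alt_eq_psum ((p :: q :: rest).take (n / 2))
      have hIHr := moves_alt_eq_psum ((p :: q :: rest).drop (n / 2))
      rw [moves_alt]
      simp only [← hn, hIHl, hIHr, PySem.List.pyGet?_neg_one]
      rw [show ((p :: q :: rest).map delta)
            = ((p :: q :: rest).take (n / 2)).map delta ++ ((p :: q :: rest).drop (n / 2)).map delta by
              rw [← List.map_append, List.take_append_drop]]
      rw [psum_append, psum_translate (((p :: q :: rest).drop (n / 2)).map delta)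
        ((psum (0, 0) (((p :: q :: rest).take (n / 2)).map delta)).getLast?.getD (0, 0))]
termination_by ws.length
decreasing_by all_goals (simp_all; try omega)

-- ===== VERDICT (by name: the statement is the Claim_ definition above) =====
theorem moves_spec : Claim_equal_moves := by
  intro wireRoute _ _
  unfold Spec_moves moves
  rw [foldl_eq_psum, moves_alt_eq_psum]
  simp
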